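-- pv_equiv track=rewrite | github.com/g0k4yy/regex-generator | regex_generator.py | _limitAndSortPatterns
-- ===== SOURCE A (Python) =====
-- def _limitAndSortPatterns(variations):
--     """Sort patterns by category priority and limit to prevent UI issues"""
--
--     # Sort by category priority
--     priority = {'recommended': 0, 'type': 1, 'default': 2}
--     sorted_variations = sorted(variations, key=lambda x: priority.get(x.get('category', 'default'), 3))
--
--     # Limit total patterns to prevent dropdown performance issues
--     # Keep top patterns from each category
--     MAX_TOTAL_PATTERNS = 30  # Reasonable limit for dropdown
--
--     if len(sorted_variations) > MAX_TOTAL_PATTERNS: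
--         # Keep more recommended and type patterns, fewer default
--         recommended = [v for v in sorted_variations if v.get('category') == 'recommended']
--         type_patterns = [v for v in sorted_variations if v.get('category') == 'type']
--         default_patterns = [v for v in sorted_variations if v.get('category') == 'default']
--
--         # Allocate space: recommended (all), type (up to 10), default (fill remaining)
--         result = []
--         result.extend(recommended)  # Keep all recommended
--         result.extend(type_patterns[:10])  # Keep up to 10 type patterns
--
--         remaining_space = MAX_TOTAL_PATTERNS - len(result)
--         if remaining_space > 0:
--             result.extend(default_patterns[:remaining_space])  # Fill with defaults
--
--         return result
--
--     return sorted_variations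
-- ===== SOURCE B (Python) =====
-- def _limitAndSortPatterns(variations):
--     """Select patterns without a comparison sort: bucket by category priority,
--     or (over the cap) pick categories directly with per-category quotas."""
--     MAX_TOTAL_PATTERNS = 30
--     if len(variations) <= MAX_TOTAL_PATTERNS:
--         # stable bucket sort by category priority
--         priority = {'recommended': 0, 'type': 1, 'default': 2}
--         buckets = [[], [], [], []]
--         for v in variations:
--             buckets[priority.get(v.get('category', 'default'), 3)].append(v)
--         return [v for b in buckets for v in b]
--     # over the cap: all recommended, up to 10 type, fill the rest with default
--     recommended = [v for v in variations if v.get('category') == 'recommended']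
--     type_patterns = [v for v in variations if v.get('category') == 'type'][:10]
--     head = recommended + type_patterns
--     space = MAX_TOTAL_PATTERNS - len(head)
--     defaults = [v for v in variations if v.get('category') == 'default'][:max(space, 0)]
--     return head + defaults
-- ===== Notes on version B (the rewrite author's own statement) =====
-- stated objective: alternative
-- what changed: Replaces sort-by-priority-then-three-filter-passes over the sorted list by a branch on the cap: a stable one-pass bucket sort when under the cap, and direct per-category quota selection from the original list when over it.
import Mathlib
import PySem

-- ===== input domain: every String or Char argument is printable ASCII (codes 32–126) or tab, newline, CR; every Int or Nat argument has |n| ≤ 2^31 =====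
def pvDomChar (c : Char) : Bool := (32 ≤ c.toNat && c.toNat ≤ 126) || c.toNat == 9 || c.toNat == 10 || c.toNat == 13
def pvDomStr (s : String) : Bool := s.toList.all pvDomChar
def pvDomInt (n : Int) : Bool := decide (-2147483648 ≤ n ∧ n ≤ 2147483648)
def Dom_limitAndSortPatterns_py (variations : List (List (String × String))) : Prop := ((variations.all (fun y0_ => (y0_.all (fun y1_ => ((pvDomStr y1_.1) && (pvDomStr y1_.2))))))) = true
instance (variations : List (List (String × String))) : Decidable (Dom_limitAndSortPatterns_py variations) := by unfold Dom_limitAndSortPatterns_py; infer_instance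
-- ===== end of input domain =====

-- B replaces A's comparison sort + three filter passes over the sorted list by a stable
-- bucket pass (≤ cap) or direct per-category selection from the original list (> cap).

-- ===== PORT A =====
def limitAndSortPatterns_py (variations : List (List (String × String))) : List (List (String × String)) :=
  let priority : PySem.Dict String Int := PySem.Dict.mk [("recommended", 0), ("type", 1), ("default", 2)]
  let sorted_variations := PySem.List.sorted variations
    (fun x => priority.getD (PySem.Dict.getD (PySem.Dict.mk x) "category" "default") 3) false
  if 30 < (sorted_variations.length : Int) then
    let recommended := sorted_variations.filter (fun v => (PySem.Dict.mk v).get? "category" == some "recommended")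
    let type_patterns := sorted_variations.filter (fun v => (PySem.Dict.mk v).get? "category" == some "type")
    let default_patterns := sorted_variations.filter (fun v => (PySem.Dict.mk v).get? "category" == some "default")
    let result : List (List (String × String)) := []
    let result := result ++ recommended
    let result := result ++ PySem.List.slice type_patterns none (some 10)
    let remaining_space : Int := 30 - (result.length : Int)
    if 0 < remaining_space then
      result ++ PySem.List.slice default_patterns none (some remaining_space)
    else
      result
  else
    sorted_variations

-- ===== PORT B =====
-- Source B's sort key: priority.get(v.get('category', 'default'), 3)
def pvKey (v : List (String × String)) : Int :=
  PySem.Dict.getD (PySem.Dict.mk [("recommended", (0:Int)), ("type", 1), ("default", 2)])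
    (PySem.Dict.getD (PySem.Dict.mk v) "category" "default") 3

-- one step of Source B's bucketing loop: buckets[key].append(v), buckets as a 4-tuple
def pvStep (acc : List (List (String × String)) × List (List (String × String)) × List (List (String × String)) × List (List (String × String)))
    (v : List (String × String)) :
    List (List (String × String)) × List (List (String × String)) × List (List (String × String)) × List (List (String × String)) :=
  let k := pvKey v
  if k == 0 then (acc.1 ++ [v], acc.2.1, acc.2.2.1, acc.2.2.2)
  else if k == 1 then (acc.1, acc.2.1 ++ [v], acc.2.2.1, acc.2.2.2)
  else if k == 2 then (acc.1, acc.2.1, acc.2.2.1 ++ [v], acc.2.2.2)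
  else (acc.1, acc.2.1, acc.2.2.1, acc.2.2.2 ++ [v])

def limitAndSortPatterns_py_alt (variations : List (List (String × String))) : List (List (String × String)) :=
  if (variations.length : Int) ≤ 30 then
    let b := variations.foldl pvStep ([], [], [], [])
    b.1 ++ b.2.1 ++ b.2.2.1 ++ b.2.2.2
  else
    let recommended := variations.filter (fun v => (PySem.Dict.mk v).get? "category" == some "recommended")
    let type_patterns := PySem.List.slice (variations.filter (fun v => (PySem.Dict.mk v).get? "category" == some "type")) none (some 10)
    let head := recommended ++ type_patterns
    let space : Int := 30 - (head.length : Int)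
    let defaults := PySem.List.slice (variations.filter (fun v => (PySem.Dict.mk v).get? "category" == some "default")) none (some (max space 0))
    head ++ defaults

-- ===== PRECONDITION & SPEC =====
def Spec_limitAndSortPatterns_py (variations : List (List (String × String))) (out : List (List (String × String))) : Prop := out = limitAndSortPatterns_py_alt variations
instance (variations : List (List (String × String))) (out : List (List (String × String))) : Decidable (Spec_limitAndSortPatterns_py variations out) := by unfold Spec_limitAndSortPatterns_py; infer_instance

-- ===== CLAIM (what is proved, stated in full; the proofs are below) =====
def Claim_equal_limitAndSortPatterns_py : Prop := ∀ (variations : List (List (String × String))), Dom_limitAndSortPatterns_py variations → Spec_limitAndSortPatterns_py variations (limitAndSortPatterns_py variations)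

-- ===== LEMMAS AND PROOFS =====

def pvCat (v : List (String × String)) : Option String := (PySem.Dict.mk v).get? "category"

def pvB (i : Int) (xs : List (List (String × String))) : List (List (String × String)) :=
  xs.filter (fun v => pvKey v == i)

theorem prio_val (s : String) :
    PySem.Dict.getD (PySem.Dict.mk [("recommended", (0:Int)), ("type", 1), ("default", 2)]) s 3
      = if s = "recommended" then 0 else if s = "type" then 1 else if s = "default" then 2 else 3 := by
  rw [PySem.Dict.getD_eq_get?_getD, PySem.Dict.get?_mk_cons, PySem.Dict.get?_mk_cons, PySem.Dict.get?_mk_cons]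
  simp only [beq_iff_eq]
  by_cases h1 : s = "recommended"
  · subst h1; rfl
  · by_cases h2 : s = "type"
    · subst h2; rfl
    · by_cases h3 : s = "default"
      · subst h3; rfl
      · rw [if_neg (fun h => h1 h.symm), if_neg (fun h => h2 h.symm), if_neg (fun h => h3 h.symm),
            if_neg h1, if_neg h2, if_neg h3]
        rfl

theorem pvKey_eq (v : List (String × String)) :
    pvKey v = (match pvCat v with
      | none => 2
      | some s => if s = "recommended" then 0 else if s = "type" then 1 else if s = "default" then 2 else 3) := by
  unfold pvKey
  rw [PySem.Dict.getD_eq_get?_getD (PySem.Dict.mk v) "category" "default"]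
  show PySem.Dict.getD _ ((pvCat v).getD "default") 3 = _
  cases h : pvCat v with
  | none => simp [prio_val]
  | some s => simp [prio_val]

theorem pvKey0_iff (v : List (String × String)) : pvKey v = 0 ↔ pvCat v = some "recommended" := by
  rw [pvKey_eq]
  cases h : pvCat v with
  | none => simp
  | some s => dsimp only; split_ifs with h1 h2 h3 <;> simp_all

theorem pvKey1_iff (v : List (String × String)) : pvKey v = 1 ↔ pvCat v = some "type" := by
  rw [pvKey_eq]
  cases h : pvCat v with
  | none => simp
  | some s => dsimp only; split_ifs with h1 h2 h3 <;> simp_all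

theorem pvKey2_iff (v : List (String × String)) : pvKey v = 2 ↔ (pvCat v = some "default" ∨ pvCat v = none) := by
  rw [pvKey_eq]
  cases h : pvCat v with
  | none => simp
  | some s => dsimp only; split_ifs with h1 h2 h3 <;> simp_all

theorem pvKey3_iff (v : List (String × String)) :
    pvKey v = 3 ↔ (¬ pvCat v = some "recommended" ∧ ¬ pvCat v = some "type" ∧ ¬ (pvCat v = some "default" ∨ pvCat v = none)) := by
  rw [pvKey_eq]
  cases h : pvCat v with
  | none => simp
  | some s => dsimp only; split_ifs with h1 h2 h3 <;> simp_all

theorem pvKey_mem (v : List (String × String)) :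
    pvKey v = 0 ∨ pvKey v = 1 ∨ pvKey v = 2 ∨ pvKey v = 3 := by
  rw [pvKey_eq]
  cases pvCat v with
  | none => simp
  | some s => dsimp only; split_ifs <;> simp

theorem pvB_mem_key {i : Int} {xs : List (List (String × String))} {y : List (String × String)}
    (h : y ∈ pvB i xs) : pvKey y = i := by
  have := List.of_mem_filter h
  simpa using this

theorem pvB_append (i : Int) (xs ys : List (List (String × String))) :
    pvB i (xs ++ ys) = pvB i xs ++ pvB i ys := by
  simp [pvB]

theorem insertBy_app_not {α : Type} (b : α → α → Bool) (x : α) (l r : List α)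
    (h : ∀ y ∈ l, b x y = false) :
    PySem.List.insertBy b x (l ++ r) = l ++ PySem.List.insertBy b x r := by
  induction l with
  | nil => simp
  | cons y l ih =>
      have hy := h y (by simp)
      simp only [List.cons_append, PySem.List.insertBy, hy, Bool.false_eq_true, if_false]
      rw [ih (fun z hz => h z (by simp [hz]))]

theorem insertBy_all {α : Type} (b : α → α → Bool) (x : α) (r : List α)
    (h : ∀ y ∈ r, b x y = true) :
    PySem.List.insertBy b x r = x :: r := by
  cases r with
  | nil => rfl
  | cons y ys => simp [PySem.List.insertBy, h y (by simp)]

theorem sorted_buckets (xs : List (List (String × String))) :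
    PySem.List.sorted xs pvKey false = pvB 0 xs ++ pvB 1 xs ++ pvB 2 xs ++ pvB 3 xs := by
  rw [PySem.List.sorted_eq_foldl_insertBy]
  induction xs using List.reverseRecOn with
  | nil => rfl
  | append_singleton xs x ih =>
      rw [List.foldl_append, List.foldl_cons, List.foldl_nil, ih]
      have hb : ∀ (i j : Int), pvKey x = i → ∀ y ∈ pvB j xs,
          (decide (pvKey x < pvKey y)) = decide (i < j) := by
        intro i j hi y hy
        rw [hi, pvB_mem_key hy]
      have hsingle : ∀ i, pvKey x = i → pvB i (xs ++ [x]) = pvB i xs ++ [x] := by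
        intro i hi
        rw [pvB_append]; simp [pvB, hi]
      have hother : ∀ i j, pvKey x = i → i ≠ j → pvB j (xs ++ [x]) = pvB j xs := by
        intro i j hi hne
        rw [pvB_append]; simp [pvB, hi, hne]
      rcases pvKey_mem x with h | h | h | h
      · rw [hsingle 0 h, hother 0 1 h (by omega), hother 0 2 h (by omega), hother 0 3 h (by omega)]
        rw [show pvB 0 xs ++ pvB 1 xs ++ pvB 2 xs ++ pvB 3 xs
              = pvB 0 xs ++ (pvB 1 xs ++ pvB 2 xs ++ pvB 3 xs) by simp]
        rw [insertBy_app_not _ _ (pvB 0 xs) _ (fun y hy => by simp [hb 0 0 h y hy])]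
        rw [insertBy_all _ _ _ (fun y hy => by
          rcases List.mem_append.1 hy with hy' | hy'
          · rcases List.mem_append.1 hy' with hy'' | hy''
            · simp [hb 0 1 h y hy'']
            · simp [hb 0 2 h y hy'']
          · simp [hb 0 3 h y hy'])]
        simp
      · rw [hother 1 0 h (by omega), hsingle 1 h, hother 1 2 h (by omega), hother 1 3 h (by omega)]
        rw [show pvB 0 xs ++ pvB 1 xs ++ pvB 2 xs ++ pvB 3 xs
              = (pvB 0 xs ++ pvB 1 xs) ++ (pvB 2 xs ++ pvB 3 xs) by simp]
        rw [insertBy_app_not _ _ (pvB 0 xs ++ pvB 1 xs) _ (fun y hy => by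
          rcases List.mem_append.1 hy with hy' | hy'
          · simp [hb 1 0 h y hy']
          · simp [hb 1 1 h y hy'])]
        rw [insertBy_all _ _ _ (fun y hy => by
          rcases List.mem_append.1 hy with hy' | hy'
          · simp [hb 1 2 h y hy']
          · simp [hb 1 3 h y hy'])]
        simp
      · rw [hother 2 0 h (by omega), hother 2 1 h (by omega), hsingle 2 h, hother 2 3 h (by omega)]
        rw [show pvB 0 xs ++ pvB 1 xs ++ pvB 2 xs ++ pvB 3 xs
              = (pvB 0 xs ++ pvB 1 xs ++ pvB 2 xs) ++ pvB 3 xs by simp]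
        rw [insertBy_app_not _ _ (pvB 0 xs ++ pvB 1 xs ++ pvB 2 xs) _ (fun y hy => by
          rcases List.mem_append.1 hy with hy' | hy'
          · rcases List.mem_append.1 hy' with hy'' | hy''
            · simp [hb 2 0 h y hy'']
            · simp [hb 2 1 h y hy'']
          · simp [hb 2 2 h y hy'])]
        rw [insertBy_all _ _ _ (fun y hy => by simp [hb 2 3 h y hy])]
        simp
      · rw [hother 3 0 h (by omega), hother 3 1 h (by omega), hother 3 2 h (by omega), hsingle 3 h]
        rw [show pvB 0 xs ++ pvB 1 xs ++ pvB 2 xs ++ pvB 3 xs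
              = (pvB 0 xs ++ pvB 1 xs ++ pvB 2 xs ++ pvB 3 xs) ++ [] by simp]
        rw [insertBy_app_not _ _ _ [] (fun y hy => by
          rcases List.mem_append.1 hy with hy' | hy'
          · rcases List.mem_append.1 hy' with hy'' | hy''
            · rcases List.mem_append.1 hy'' with h3 | h3
              · simp [hb 3 0 h y h3]
              · simp [hb 3 1 h y h3]
            · simp [hb 3 2 h y hy'']
          · simp [hb 3 3 h y hy'])]
        simp [PySem.List.insertBy]

theorem foldl_pvStep (xs : List (List (String × String)))
    (a b c d : List (List (String × String))) :
    xs.foldl pvStep (a, b, c, d) =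
      (a ++ pvB 0 xs, b ++ pvB 1 xs, c ++ pvB 2 xs, d ++ pvB 3 xs) := by
  induction xs generalizing a b c d with
  | nil => simp [pvB]
  | cons v xs ih =>
      rw [List.foldl_cons]
      show List.foldl pvStep (pvStep (a, b, c, d) v) xs = _
      rcases pvKey_mem v with h | h | h | h
      · have hstep : pvStep (a, b, c, d) v = (a ++ [v], b, c, d) := by simp [pvStep, h]
        rw [hstep, ih]
        simp [pvB, h]
      · have hstep : pvStep (a, b, c, d) v = (a, b ++ [v], c, d) := by simp [pvStep, h]
        rw [hstep, ih]
        simp [pvB, h]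
      · have hstep : pvStep (a, b, c, d) v = (a, b, c ++ [v], d) := by simp [pvStep, h]
        rw [hstep, ih]
        simp [pvB, h]
      · have hstep : pvStep (a, b, c, d) v = (a, b, c, d ++ [v]) := by simp [pvStep, h]
        rw [hstep, ih]
        simp [pvB, h]

theorem pvB0_eq (xs : List (List (String × String))) :
    pvB 0 xs = xs.filter (fun v => pvCat v == some "recommended") := by
  apply List.filter_congr; intro v _
  rw [Bool.eq_iff_iff]; simp [pvKey0_iff]

theorem pvB1_eq (xs : List (List (String × String))) :
    pvB 1 xs = xs.filter (fun v => pvCat v == some "type") := by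
  apply List.filter_congr; intro v _
  rw [Bool.eq_iff_iff]; simp [pvKey1_iff]

-- filtering A's sorted list by a category predicate = filtering the original list
theorem filt_rec (xs : List (List (String × String))) :
    (pvB 0 xs ++ pvB 1 xs ++ pvB 2 xs ++ pvB 3 xs).filter (fun v => pvCat v == some "recommended")
      = xs.filter (fun v => pvCat v == some "recommended") := by
  simp only [List.filter_append]
  have e0 : (pvB 0 xs).filter (fun v => pvCat v == some "recommended") = pvB 0 xs :=
    List.filter_eq_self.mpr (fun v hv => by simp [(pvKey0_iff v).1 (pvB_mem_key hv)])
  have e1 : (pvB 1 xs).filter (fun v => pvCat v == some "recommended") = [] :=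
    List.filter_eq_nil_iff.mpr (fun v hv => by
      have := (pvKey1_iff v).1 (pvB_mem_key hv); simp_all)
  have e2 : (pvB 2 xs).filter (fun v => pvCat v == some "recommended") = [] :=
    List.filter_eq_nil_iff.mpr (fun v hv => by
      have := (pvKey2_iff v).1 (pvB_mem_key hv); rcases this with h | h <;> simp_all)
  have e3 : (pvB 3 xs).filter (fun v => pvCat v == some "recommended") = [] :=
    List.filter_eq_nil_iff.mpr (fun v hv => by
      have := (pvKey3_iff v).1 (pvB_mem_key hv); simp_all)
  rw [e0, e1, e2, e3, pvB0_eq]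
  simp

theorem filt_type (xs : List (List (String × String))) :
    (pvB 0 xs ++ pvB 1 xs ++ pvB 2 xs ++ pvB 3 xs).filter (fun v => pvCat v == some "type")
      = xs.filter (fun v => pvCat v == some "type") := by
  simp only [List.filter_append]
  have e0 : (pvB 0 xs).filter (fun v => pvCat v == some "type") = [] :=
    List.filter_eq_nil_iff.mpr (fun v hv => by
      have := (pvKey0_iff v).1 (pvB_mem_key hv); simp_all)
  have e1 : (pvB 1 xs).filter (fun v => pvCat v == some "type") = pvB 1 xs :=
    List.filter_eq_self.mpr (fun v hv => by simp [(pvKey1_iff v).1 (pvB_mem_key hv)])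
  have e2 : (pvB 2 xs).filter (fun v => pvCat v == some "type") = [] :=
    List.filter_eq_nil_iff.mpr (fun v hv => by
      have := (pvKey2_iff v).1 (pvB_mem_key hv); rcases this with h | h <;> simp_all)
  have e3 : (pvB 3 xs).filter (fun v => pvCat v == some "type") = [] :=
    List.filter_eq_nil_iff.mpr (fun v hv => by
      have := (pvKey3_iff v).1 (pvB_mem_key hv); simp_all)
  rw [e0, e1, e2, e3, pvB1_eq]
  simp

theorem filt_def (xs : List (List (String × String))) :
    (pvB 0 xs ++ pvB 1 xs ++ pvB 2 xs ++ pvB 3 xs).filter (fun v => pvCat v == some "default")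
      = xs.filter (fun v => pvCat v == some "default") := by
  simp only [List.filter_append]
  have e0 : (pvB 0 xs).filter (fun v => pvCat v == some "default") = [] :=
    List.filter_eq_nil_iff.mpr (fun v hv => by
      have := (pvKey0_iff v).1 (pvB_mem_key hv); simp_all)
  have e1 : (pvB 1 xs).filter (fun v => pvCat v == some "default") = [] :=
    List.filter_eq_nil_iff.mpr (fun v hv => by
      have := (pvKey1_iff v).1 (pvB_mem_key hv); simp_all)
  have e3 : (pvB 3 xs).filter (fun v => pvCat v == some "default") = [] :=
    List.filter_eq_nil_iff.mpr (fun v hv => by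
      have := (pvKey3_iff v).1 (pvB_mem_key hv); simp_all)
  have e2 : (pvB 2 xs).filter (fun v => pvCat v == some "default")
      = xs.filter (fun v => pvCat v == some "default") := by
    unfold pvB
    rw [List.filter_filter]
    apply List.filter_congr
    intro v _
    rw [Bool.eq_iff_iff]
    simp only [Bool.and_eq_true, beq_iff_eq, pvKey2_iff]
    tauto
  rw [e0, e1, e2, e3]
  simp

theorem main_eq (vs : List (List (String × String))) :
    limitAndSortPatterns_py vs = limitAndSortPatterns_py_alt vs := by
  unfold limitAndSortPatterns_py limitAndSortPatterns_py_alt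
  simp only []
  have hkey : (fun x : List (String × String) =>
      (PySem.Dict.mk [("recommended", (0:Int)), ("type", 1), ("default", 2)]).getD
        ((PySem.Dict.mk x).getD "category" "default") 3) = pvKey := rfl
  rw [hkey]
  rw [PySem.List.length_sorted]
  rw [foldl_pvStep vs [] [] [] []]
  simp only [List.nil_append]
  rw [sorted_buckets]
  by_cases hn : (30:Int) < (vs.length : Int)
  · rw [if_pos hn, if_neg (by omega : ¬ ((vs.length : Int) ≤ 30))]
    have hc : ∀ v : List (String × String), ((PySem.Dict.mk v).get? "category") = pvCat v := fun _ => rfl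
    simp only [hc]
    rw [filt_rec, filt_type, filt_def]
    set rec := vs.filter (fun v => pvCat v == some "recommended") with hrec
    set typ := PySem.List.slice (vs.filter (fun v => pvCat v == some "type")) none (some 10) with htyp
    set dfl := vs.filter (fun v => pvCat v == some "default") with hdfl
    set space : Int := 30 - (((rec ++ typ).length : Nat) : Int) with hspace
    by_cases hs : 0 < space
    · rw [if_pos hs]
      rw [show max space 0 = space from by omega]
    · rw [if_neg hs]
      rw [show max space 0 = 0 from by omega]
      rw [PySem.List.slice_to (b := 0) (hb := by norm_num)]
      simp
  · rw [if_neg hn, if_pos (by omega : ((vs.length : Int) ≤ 30))]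

-- ===== VERDICT (by name: the statement is the Claim_ definition above) =====
theorem limitAndSortPatterns_py_spec : Claim_equal_limitAndSortPatterns_py := by
  intro variations _
  exact main_eq variations
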